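-- pv_equiv track=rewrite | github.com/thumbe12856/competitive-programming | cf/1600_Binary_String/solve.py | solve
-- ===== SOURCE A (Python) =====
-- def solve(S):
--     N = len(S)
--     o_idx = []
--     for i in range(N):
--         if S[i] == "1":
--             o_idx.append(i)
--
--     o_cnt = len(o_idx)
--     z_cnt = N - o_cnt
--     if not z_cnt or not o_cnt:
--         return 0
--
--     def check(n):
--         # try to remove n "1"
--         # check if the cost is smaller or equal than n
--
--         x = len(o_idx) - n # left "1" number in the substring
--
--         # substring = S[i: i + x]
--         for i in range(n + 1):
--             l = o_idx[i]
--             r = o_idx[i + x - 1]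
--
--             # r - l + 1 = len(sub_string)
--             # r - l + 1 - x = left "0" number in the sub_string
--             if r - l + 1 - x <= n:
--                 return True
--         return False
--
--     ans = o_cnt
--     l, r = 0, ans
--     while l < r:
--         mid = (l + r) // 2
--         if check(mid):
--             ans = mid
--             r = mid
--         else:
--             l = mid + 1
--
--     return ans
-- ===== SOURCE B (Python) =====
-- def solve(S):
--     # B: brute-force minimum over all windows of consecutive ones
--     ones = [i for i, c in enumerate(S) if c == "1"]
--     m = len(ones)
--     if m == 0 or m == len(S):
--         return 0
--     best = m  # baseline: delete every '1'
--     for i in range(m):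
--         for j in range(i, m):
--             zeros = ones[j] - ones[i] - (j - i)
--             removed = m - (j - i + 1)
--             c = max(zeros, removed)
--             if c < best:
--                 best = c
--     return best
-- ===== Notes on version B (the rewrite author's own statement) =====
-- stated objective: simpler
-- what changed: Replaces A's binary search over the monotone feasibility predicate check(n) (can n ones be removed at cost <= n?) by a direct brute-force minimisation of max(zeros inside, ones removed) over all windows of consecutive ones, plus the delete-all-ones baseline.
import Mathlib
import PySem

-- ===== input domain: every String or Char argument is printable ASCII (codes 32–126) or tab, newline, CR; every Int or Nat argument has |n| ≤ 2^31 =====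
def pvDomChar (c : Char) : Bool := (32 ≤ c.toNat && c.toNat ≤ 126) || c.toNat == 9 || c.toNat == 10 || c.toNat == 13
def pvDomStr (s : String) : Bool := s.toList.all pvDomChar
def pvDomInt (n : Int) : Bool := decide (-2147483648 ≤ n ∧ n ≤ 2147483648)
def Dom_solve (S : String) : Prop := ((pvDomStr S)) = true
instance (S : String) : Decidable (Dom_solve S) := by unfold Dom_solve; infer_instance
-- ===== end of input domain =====

-- B replaces A's binary search over a feasibility predicate by a direct minimisation of
-- max(zeros inside the window, ones removed) over all windows of consecutive ones (objective: simpler).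

-- ===== PORT A =====
-- Python's nested `def check(n)` (a closure over o_idx)
def solveCheck (o_idx : List Int) (n : Int) : Bool :=
  let x : Int := (o_idx.length : Int) - n
  (PySem.List.pyRange 0 (n + 1)).any fun i =>
    match PySem.List.pyGet? o_idx i, PySem.List.pyGet? o_idx (i + x - 1) with
    | some l, some r => decide (r - l + 1 - x ≤ n)
    | _, _ => false

-- the `while l < r` binary-search loop, state (ans, l, r)
def solveLoopA (check : Int → Bool) (ans l r : Int) : Int :=
  if h : l < r then
    let mid := PySem.Int.floordiv (l + r) 2
    if check mid then solveLoopA check mid l mid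
    else solveLoopA check ans (mid + 1) r
  else ans
termination_by (r - l).toNat
decreasing_by
  · have h2 : PySem.Int.floordiv (l + r) 2 < r :=
      (PySem.Int.floordiv_lt_iff_lt_mul (b := 2) (by norm_num)).2 (by omega)
    omega
  · have h1 := PySem.Int.floordiv_two_mid_bounds (le_of_lt h)
    omega

def solve (S : String) : Int :=
  let N : Int := PySem.Str.len S
  let o_idx : List Int :=
    (PySem.List.pyRange 0 N).foldl
      (fun acc i => if PySem.Str.pyGet? S i == some '1' then acc ++ [i] else acc) []
  let o_cnt : Int := (o_idx.length : Int)
  let z_cnt : Int := N - o_cnt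
  if z_cnt = 0 ∨ o_cnt = 0 then 0
  else solveLoopA (solveCheck o_idx) o_cnt 0 o_cnt

-- ===== PORT B =====
def solve_alt (S : String) : Int :=
  let ones : List Int :=
    (PySem.List.enumerate S.toList).foldl
      (fun acc p => if p.2 == '1' then acc ++ [p.1] else acc) []
  let m : Int := (ones.length : Int)
  if m = 0 ∨ m = PySem.Str.len S then 0
  else
    (PySem.List.pyRange 0 m).foldl (fun best i =>
      (PySem.List.pyRange i m).foldl (fun best j =>
        let zeros := PySem.List.pyGetD ones j 0 - PySem.List.pyGetD ones i 0 - (j - i)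
        let removed := m - (j - i + 1)
        let c := max zeros removed
        if c < best then c else best) best) m

-- ===== PRECONDITION & SPEC =====
def Spec_solve (S : String) (out : Int) : Prop := out = solve_alt S
instance (S : String) (out : Int) : Decidable (Spec_solve S out) := by unfold Spec_solve; infer_instance

-- ===== CLAIM (what is proved, stated in full; the proofs are below) =====
def Claim_equal_solve : Prop := ∀ (S : String), Dom_solve S → Spec_solve S (solve S)

-- ===== LEMMAS AND PROOFS =====

-- the list of indices of '1' characters, starting at offset k
def onesL : List Char → Int → List Int
  | [], _ => []
  | c :: t, k => (if c == '1' then [k] else []) ++ onesL t (k + 1)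

-- zeros strictly inside the window of ones [i..j]
def zerW (xs : List Int) (i j : Int) : Int :=
  PySem.List.pyGetD xs j 0 - PySem.List.pyGetD xs i 0 - (j - i)

lemma pyGet?_eq_some_getD (xs : List Int) (i : Int) (h0 : 0 ≤ i) (h : i < (xs.length : Int)) :
    PySem.List.pyGet? xs i = some (PySem.List.pyGetD xs i 0) := by
  simp only [PySem.List.pyGet?, PySem.List.pyIdx?, PySem.List.pyGetD, if_pos h0, if_pos h]
  simp only [Option.bind_some]
  rw [List.getElem?_eq_getElem (by omega)]
  rfl

lemma onesL_length_le (cs : List Char) : ∀ k : Int, (onesL cs k).length ≤ cs.length := by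
  induction cs with
  | nil => simp [onesL]
  | cons c t ih =>
    intro k
    simp only [onesL, List.length_append, List.length_cons]
    have := ih (k + 1)
    split_ifs <;> simp <;> omega

lemma onesL_pairwise (cs : List Char) :
    ∀ k : Int, (∀ x ∈ onesL cs k, k ≤ x) ∧ (onesL cs k).Pairwise (· < ·) := by
  induction cs with
  | nil => simp [onesL]
  | cons c t ih =>
    intro k
    obtain ⟨ih1, ih2⟩ := ih (k + 1)
    constructor
    · intro x hx
      simp only [onesL, List.mem_append] at hx
      rcases hx with hx | hx
      · split_ifs at hx <;> simp at hx; omega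
      · have := ih1 x hx; omega
    · simp only [onesL]
      split_ifs with hc
      · simp only [List.singleton_append, List.pairwise_cons]
        exact ⟨fun x hx => by have := ih1 x hx; omega, ih2⟩
      · simpa using ih2

lemma onesB_eq (cs : List Char) :
    ∀ k : Int, (PySem.List.enumerate cs k).foldl
      (fun acc p => if p.2 == '1' then acc ++ [p.1] else acc) []
    = onesL cs k := by
  induction cs with
  | nil => intro k; simp [PySem.List.enumerate, onesL]
  | cons c t ih =>
    intro k
    rw [show PySem.List.enumerate (c :: t) k = (k, c) :: PySem.List.enumerate t (k + 1) from rfl]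
    simp only [List.foldl_cons]
    rw [PySem.List.foldl_append_if (fun p => p.2 == '1') Prod.fst, onesL]
    have h2 : List.map Prod.fst (List.filter (fun p => p.2 == '1') (PySem.List.enumerate t (k + 1)))
        = onesL t (k + 1) := by
      have h3 := PySem.List.foldl_append_if (fun p : Int × Char => p.2 == '1') Prod.fst
        (PySem.List.enumerate t (k + 1)) ([] : List Int)
      rw [ih (k + 1)] at h3
      simpa using h3.symm
    rw [h2]
    split_ifs <;> simp

lemma onesL_eq_range (cs : List Char) :
    ∀ k : Nat, onesL cs (k : Int)
      = ((List.range cs.length).filter (fun j => cs[j]? == some '1')).map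
          (fun j => ((k + j : Nat) : Int)) := by
  induction cs with
  | nil => intro k; simp [onesL]
  | cons c t ih =>
    intro k
    simp only [onesL, List.length_cons, List.range_succ_eq_map, List.filter_cons, List.filter_map]
    have hcast : ((k : Int) + 1) = ((k + 1 : Nat) : Int) := by push_cast; ring
    rw [hcast, ih (k + 1)]
    simp only [List.getElem?_cons_zero, Function.comp_def, List.getElem?_cons_succ]
    have hpred : (some c == some '1') = (c == '1') := by
      cases h : c == '1' <;> simp_all
    rw [hpred]
    split_ifs with hc
    · simp only [List.singleton_append, List.map_cons, List.map_map, Nat.add_zero]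
      refine List.cons_eq_cons.mpr ⟨rfl, ?_⟩
      apply List.map_congr_left
      intro j hj
      simp only [Function.comp_apply]
      omega
    · simp only [List.nil_append, List.map_map]
      apply List.map_congr_left
      intro j hj
      simp only [Function.comp_apply]
      omega

lemma onesA_eq (S : String) :
    (PySem.List.pyRange 0 (PySem.Str.len S)).foldl
      (fun acc i => if PySem.Str.pyGet? S i == some '1' then acc ++ [i] else acc) []
    = onesL S.toList 0 := by
  conv_rhs => rw [show ((0 : Int) = ((0 : Nat) : Int)) from rfl, onesL_eq_range]
  have h := PySem.List.foldl_append_if (fun i => PySem.Str.pyGet? S i == some '1') id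
    (PySem.List.pyRange 0 (PySem.Str.len S)) ([] : List Int)
  simp only [id_eq] at h
  rw [h]
  rw [PySem.Str.len_eq, PySem.List.pyRange_zero_natCast, List.filter_map]
  simp only [List.nil_append, List.map_map]
  have : ((fun i => PySem.Str.pyGet? S i == some '1') ∘ fun (k : Nat) => (k : Int))
      = fun j => S.toList[j]? == some '1' := by
    funext j
    simp
  rw [this]
  simp

lemma gap_nat (xs : List Int) (hpw : xs.Pairwise (· < ·)) (p : Nat) :
    ∀ q, p ≤ q → q < xs.length → (q : Int) - (p : Int) ≤ xs.getD q 0 - xs.getD p 0 := by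
  intro q hpq
  induction q, hpq using Nat.le_induction with
  | base => intro hq; simp
  | succ n hn ih =>
    intro hq
    have h1 := ih (by omega)
    have h2 : xs.getD n 0 < xs.getD (n + 1) 0 := by
      rw [List.getD_eq_getElem xs 0 (by omega), List.getD_eq_getElem xs 0 hq]
      exact (List.pairwise_iff_getElem.1 hpw) n (n + 1) (by omega) hq (by omega)
    push_cast
    omega

lemma gap_ge (xs : List Int) (hpw : xs.Pairwise (· < ·)) (i j : Int)
    (h0 : 0 ≤ i) (hij : i ≤ j) (hj : j < (xs.length : Int)) :
    j - i ≤ PySem.List.pyGetD xs j 0 - PySem.List.pyGetD xs i 0 := by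
  have hi' : i = ((i.toNat : Nat) : Int) := by omega
  have hj' : j = ((j.toNat : Nat) : Int) := by omega
  rw [hi', hj', PySem.List.pyGetD_natCast, PySem.List.pyGetD_natCast]
  have := gap_nat xs hpw i.toNat j.toNat (by omega) (by omega)
  omega

lemma zerW_mono (xs : List Int) (hpw : xs.Pairwise (· < ·)) (i j' j : Int)
    (h0 : 0 ≤ i) (hij : i ≤ j') (hjj : j' ≤ j) (hj : j < (xs.length : Int)) :
    zerW xs i j' ≤ zerW xs i j := by
  have := gap_ge xs hpw j' j (by omega) hjj hj
  unfold zerW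
  omega

-- characterization of A's check on its admitted range 0 ≤ n < len
lemma check_iff (xs : List Int) (n : Int) (_h0 : 0 ≤ n) (hn : n < (xs.length : Int)) :
    solveCheck xs n = true
      ↔ ∃ i : Int, 0 ≤ i ∧ i ≤ n ∧ zerW xs i (i + ((xs.length : Int) - n) - 1) ≤ n := by
  unfold solveCheck
  rw [List.any_eq_true]
  constructor
  · rintro ⟨i, hmem, hp⟩
    rw [PySem.List.mem_pyRange_one] at hmem
    obtain ⟨hi0, hi1⟩ := hmem
    rw [pyGet?_eq_some_getD xs i hi0 (by omega)] at hp
    rw [pyGet?_eq_some_getD xs _ (by omega) (by omega)] at hp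
    refine ⟨i, hi0, by omega, ?_⟩
    simp only [decide_eq_true_eq] at hp
    unfold zerW
    omega
  · rintro ⟨i, hi0, hin, hz⟩
    refine ⟨i, ?_, ?_⟩
    · rw [PySem.List.mem_pyRange_one]; omega
    · rw [pyGet?_eq_some_getD xs i hi0 (by omega), pyGet?_eq_some_getD xs _ (by omega) (by omega)]
      simp only [decide_eq_true_eq]
      unfold zerW at hz
      omega

lemma foldl_min_spec (f : Int → Int) (L : List Int) :
    ∀ b0 : Int,
    ((L.foldl (fun b x => if f x < b then f x else b) b0) = b0
      ∨ ∃ x ∈ L, (L.foldl (fun b x => if f x < b then f x else b) b0) = f x)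
    ∧ (L.foldl (fun b x => if f x < b then f x else b) b0) ≤ b0
    ∧ ∀ x ∈ L, (L.foldl (fun b x => if f x < b then f x else b) b0) ≤ f x := by
  induction L with
  | nil => simp
  | cons a t ih =>
    intro b0
    simp only [List.foldl_cons]
    obtain ⟨h1, h2, h3⟩ := ih (if f a < b0 then f a else b0)
    refine ⟨?_, ?_, ?_⟩
    · rcases h1 with h | h
      · by_cases hc : f a < b0
        · right; exact ⟨a, by simp, by rw [h, if_pos hc]⟩
        · left; rw [h, if_neg hc]
      · right; obtain ⟨x, hx, he⟩ := h; exact ⟨x, by simp [hx], he⟩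
    · split_ifs at h2 ⊢ with hc <;> omega
    · intro x hx
      rcases List.mem_cons.1 hx with rfl | hx'
      · split_ifs at h2 ⊢ with hc <;> omega
      · exact h3 x hx'

lemma foldl_min_nested (f : Int → Int → Int) (Li : Int → List Int) (L : List Int) :
    ∀ b0 : Int,
    ((L.foldl (fun b i => (Li i).foldl (fun b j => if f i j < b then f i j else b) b) b0) = b0
      ∨ ∃ i ∈ L, ∃ j ∈ Li i,
        (L.foldl (fun b i => (Li i).foldl (fun b j => if f i j < b then f i j else b) b) b0) = f i j)
    ∧ (L.foldl (fun b i => (Li i).foldl (fun b j => if f i j < b then f i j else b) b) b0) ≤ b0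
    ∧ ∀ i ∈ L, ∀ j ∈ Li i,
        (L.foldl (fun b i => (Li i).foldl (fun b j => if f i j < b then f i j else b) b) b0) ≤ f i j := by
  induction L with
  | nil => simp
  | cons a t ih =>
    intro b0
    simp only [List.foldl_cons]
    obtain ⟨g1, g2, g3⟩ := foldl_min_spec (f a) (Li a) b0
    set b1 := (Li a).foldl (fun b j => if f a j < b then f a j else b) b0 with hb1
    obtain ⟨h1, h2, h3⟩ := ih b1
    refine ⟨?_, ?_, ?_⟩
    · rcases h1 with h | h
      · rcases g1 with g | g
        · left; rw [h, g]
        · right; obtain ⟨j, hj, he⟩ := g; exact ⟨a, by simp, j, hj, by rw [h, he]⟩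
      · right; obtain ⟨i, hi, j, hj, he⟩ := h; exact ⟨i, by simp [hi], j, hj, he⟩
    · omega
    · intro i hi j hj
      rcases List.mem_cons.1 hi with rfl | hi'
      · have := g3 j hj; omega
      · exact h3 i hi' j hj

-- the binary-search loop returns G, the least index at which check fires
lemma loopA_eq (check : Int → Bool) (m G : Int)
    (hG0 : 0 ≤ G) (hGm : G < m)
    (hcG : check G = true)
    (hmin : ∀ n, 0 ≤ n → n < m → check n = true → G ≤ n)
    (hmono : ∀ a b, 0 ≤ a → check a = true → a ≤ b → b < m → check b = true) :
    ∀ l r ans, 0 ≤ l → l ≤ G → G ≤ r → r ≤ m → (ans = r ∨ (ans = m ∧ r = m)) →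
      solveLoopA check ans l r = G := by
  have main : ∀ k : Nat, ∀ l r ans, (r - l).toNat ≤ k → 0 ≤ l → l ≤ G → G ≤ r → r ≤ m →
      (ans = r ∨ (ans = m ∧ r = m)) → solveLoopA check ans l r = G := by
    intro k
    induction k with
    | zero =>
      intro l r ans hk h0 hlG hGr hrm hans
      rw [solveLoopA, dif_neg (by omega : ¬ l < r)]
      rcases hans with rfl | ⟨rfl, rfl⟩ <;> omega
    | succ k ih =>
      intro l r ans hk h0 hlG hGr hrm hans
      rw [solveLoopA]
      by_cases hlr : l < r
      · simp only [dif_pos hlr]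
        have hmb := PySem.Int.floordiv_two_mid_bounds (le_of_lt hlr)
        have hmid2 : PySem.Int.floordiv (l + r) 2 < r :=
          (PySem.Int.floordiv_lt_iff_lt_mul (b := 2) (by norm_num)).2 (by omega)
        set mid := PySem.Int.floordiv (l + r) 2 with hmid
        by_cases hc : check mid = true
        · rw [if_pos hc]
          have hGmid : G ≤ mid := hmin mid (by omega) (by omega) hc
          exact ih l mid mid (by omega) h0 hlG hGmid (by omega) (Or.inl rfl)
        · rw [if_neg hc]
          have hmidG : mid < G := by
            by_contra hcon
            exact hc (hmono G mid hG0 hcG (by omega) (by omega))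
          exact ih (mid + 1) r ans (by omega) (by omega) (by omega) hGr hrm hans
      · rw [dif_neg hlr]
        rcases hans with rfl | ⟨rfl, rfl⟩ <;> omega
  intro l r ans h0 hlG hGr hrm hans
  exact main (r - l).toNat l r ans le_rfl h0 hlG hGr hrm hans

-- the core equivalence on an arbitrary strictly increasing ones-index list
lemma core (xs : List Int) (hpw : xs.Pairwise (· < ·)) (hm : 1 ≤ xs.length) :
    solveLoopA (solveCheck xs) (xs.length : Int) 0 (xs.length : Int)
      = (PySem.List.pyRange 0 (xs.length : Int)).foldl (fun best i =>
          (PySem.List.pyRange i (xs.length : Int)).foldl (fun best j =>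
            if max (PySem.List.pyGetD xs j 0 - PySem.List.pyGetD xs i 0 - (j - i))
                   ((xs.length : Int) - (j - i + 1)) < best
            then max (PySem.List.pyGetD xs j 0 - PySem.List.pyGetD xs i 0 - (j - i))
                     ((xs.length : Int) - (j - i + 1))
            else best) best) (xs.length : Int) := by
  have hmZ : (1 : Int) ≤ (xs.length : Int) := by exact_mod_cast hm
  obtain ⟨hex, hb0, hub⟩ := foldl_min_nested
    (fun i j => max (PySem.List.pyGetD xs j 0 - PySem.List.pyGetD xs i 0 - (j - i))
      ((xs.length : Int) - (j - i + 1)))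
    (fun i => PySem.List.pyRange i (xs.length : Int))
    (PySem.List.pyRange 0 (xs.length : Int)) (xs.length : Int)
  set m : Int := (xs.length : Int) with hmdef
  set b : Int := (PySem.List.pyRange 0 m).foldl (fun best i =>
      (PySem.List.pyRange i m).foldl (fun best j =>
        if max (PySem.List.pyGetD xs j 0 - PySem.List.pyGetD xs i 0 - (j - i)) (m - (j - i + 1)) < best
        then max (PySem.List.pyGetD xs j 0 - PySem.List.pyGetD xs i 0 - (j - i)) (m - (j - i + 1))
        else best) best) m with hbdef
  -- b is at most m - 1 (the single-one window at index 0)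
  have h00 : (0 : Int) ∈ PySem.List.pyRange 0 m := PySem.List.mem_pyRange_one.2 ⟨le_refl 0, by omega⟩
  have hble : b ≤ m - 1 := by
    have := hub 0 h00 0 (PySem.List.mem_pyRange_one.2 ⟨le_refl 0, by omega⟩)
    simp only [sub_self] at this
    have hz : PySem.List.pyGetD xs 0 0 - PySem.List.pyGetD xs 0 0 - 0 = 0 := by ring
    omega
  -- b is attained at some window (i0, j0)
  have hattain : ∃ i0 j0, 0 ≤ i0 ∧ i0 ≤ j0 ∧ j0 < m ∧
      b = max (zerW xs i0 j0) (m - (j0 - i0 + 1)) := by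
    rcases hex with h | ⟨i0, hi0, j0, hj0, he⟩
    · omega
    · rw [PySem.List.mem_pyRange_one] at hi0 hj0
      exact ⟨i0, j0, hi0.1, hj0.1, hj0.2, he⟩
  obtain ⟨i0, j0, hi00, hij0, hj0m, hbeq⟩ := hattain
  have hzer0 : zerW xs i0 j0 ≤ b := by rw [hbeq]; exact le_max_left _ _
  have hrem0 : m - (j0 - i0 + 1) ≤ b := by rw [hbeq]; exact le_max_right _ _
  have hb0' : 0 ≤ b := by omega
  -- upper bound: b is below every window's cost
  have hubW : ∀ i j : Int, 0 ≤ i → i ≤ j → j < m → b ≤ max (zerW xs i j) (m - (j - i + 1)) := by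
    intro i j hi hij hj
    exact hub i (PySem.List.mem_pyRange_one.2 ⟨by omega, by omega⟩)
      j (PySem.List.mem_pyRange_one.2 ⟨by omega, by omega⟩)
  -- A's check fires at b
  have hcG : solveCheck xs b = true := by
    rw [check_iff xs b hb0' (by omega), ← hmdef]
    refine ⟨i0, hi00, by omega, ?_⟩
    have hj'le : i0 + (m - b) - 1 ≤ j0 := by omega
    have := zerW_mono xs hpw i0 (i0 + (m - b) - 1) j0 hi00 (by omega) hj'le (by omega)
    omega
  -- b is below every index where check fires
  have hmin : ∀ n, 0 ≤ n → n < m → solveCheck xs n = true → b ≤ n := by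
    intro n hn0 hnm hc
    rw [check_iff xs n hn0 hnm, ← hmdef] at hc
    obtain ⟨i, hi0, hin, hz⟩ := hc
    have hw := hubW i (i + (m - n) - 1) hi0 (by omega) (by omega)
    have : m - ((i + (m - n) - 1) - i + 1) = n := by ring
    omega
  -- check is monotone below m
  have hmono : ∀ a c, 0 ≤ a → solveCheck xs a = true → a ≤ c → c < m →
      solveCheck xs c = true := by
    intro a c ha0 hca hac hcm
    rw [check_iff xs a ha0 (by omega), ← hmdef] at hca
    rw [check_iff xs c (by omega) hcm, ← hmdef]
    obtain ⟨i, hi0, hia, hz⟩ := hca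
    refine ⟨i, hi0, by omega, ?_⟩
    have := zerW_mono xs hpw i (i + (m - c) - 1) (i + (m - a) - 1) hi0 (by omega) (by omega)
      (by omega)
    omega
  exact loopA_eq (solveCheck xs) m b hb0' (by omega) hcG hmin hmono 0 m m
    (le_refl 0) (by omega) (by omega) (le_refl m) (Or.inr ⟨rfl, rfl⟩)

-- ===== VERDICT (by name: the statement is the Claim_ definition above) =====
theorem solve_spec : Claim_equal_solve := by
  intro S _
  unfold Spec_solve
  simp only [solve, solve_alt]
  rw [onesA_eq S, onesB_eq S.toList]
  set xs : List Int := onesL S.toList 0 with hxs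
  have hlen : xs.length ≤ S.toList.length := onesL_length_le S.toList 0
  have hpw : xs.Pairwise (· < ·) := (onesL_pairwise S.toList 0).2
  rw [PySem.Str.len_eq]
  by_cases h0 : xs.length = 0
  · rw [if_pos (Or.inr (by exact_mod_cast h0)), if_pos (Or.inl (by exact_mod_cast h0))]
  · by_cases hfull : xs.length = S.toList.length
    · rw [if_pos (Or.inl (by omega)), if_pos (Or.inr (by exact_mod_cast hfull))]
    · have hA : ¬((S.toList.length : Int) - (xs.length : Int) = 0 ∨ (xs.length : Int) = 0) := by
        rintro (h | h) <;> omega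
      have hB : ¬((xs.length : Int) = 0 ∨ (xs.length : Int) = (S.toList.length : Int)) := by
        rintro (h | h) <;> omega
      rw [if_neg hA, if_neg hB]
      exact core xs hpw (by omega)
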